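-- pv_equiv track=rewrite | github.com/saxo-datagov/datahub | metadata-ingestion/src/datahub/ingestion/source/snowflake/snowflake_pipes.py | _stage_reference_to_fqn
-- ===== SOURCE A (Python) =====
-- from typing import Dict, Iterable, List, Optional
--
-- def _stage_reference_to_fqn(
--     raw: str, default_db: str, default_schema: str
-- ) -> Optional[str]:
--     """Convert a raw stage reference like `@db.schema.stage/path` into a 3-part FQN."""
--     if not raw.startswith("@"):
--         return None
--     stripped = raw[1:].split("/", 1)[0]
--     if not stripped:
--         return None
--
--     parts = [part.strip('"') for part in stripped.split(".") if part.strip('"')]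
--     if len(parts) == 1:
--         db, schema, name = default_db, default_schema, parts[0]
--     elif len(parts) == 2:
--         db, schema, name = default_db, parts[0], parts[1]
--     elif len(parts) == 3:
--         db, schema, name = parts[0], parts[1], parts[2]
--     else:
--         return None
--     return f"{db}.{schema}.{name}".upper()
-- ===== SOURCE B (Python) =====
-- from typing import Optional
--
--
-- def _stage_reference_to_fqn(
--     raw: str, default_db: str, default_schema: str
-- ) -> Optional[str]:
--     """Convert a raw stage reference like `@db.schema.stage/path` into a 3-part FQN."""
--     if not raw.startswith("@"):
--         return None
--     body = raw[1:]
--     if body[:1] in ("", "/"):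
--         return None
--     # single character scan: cut at '/', split at '.', strip quotes, drop empties
--     parts = []
--     cur = ""
--     for ch in body:
--         if ch == "/":
--             break
--         if ch == ".":
--             seg = cur.strip('"')
--             if seg:
--                 parts.append(seg)
--             cur = ""
--         else:
--             cur += ch
--     seg = cur.strip('"')
--     if seg:
--         parts.append(seg)
--     if not 1 <= len(parts) <= 3:
--         return None
--     # right-align: pad missing leading components with the defaults
--     while len(parts) < 3:
--         parts.insert(0, default_db if len(parts) == 2 else default_schema)
--     return ".".join(parts).upper()
-- ===== Notes on version B (the rewrite author's own statement) =====
-- stated objective: alternative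
-- what changed: A's staged pipeline (slice, split('/',1), split('.'), a strip-twice comprehension, then a three-way if/elif ladder with an f-string) is replaced by a single character-by-character scan with a segment accumulator that cuts at '/', splits at '.' and strips quotes as it goes, plus a while loop that right-pads the missing leading components with the defaults before one '.'.join.
import Mathlib
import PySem

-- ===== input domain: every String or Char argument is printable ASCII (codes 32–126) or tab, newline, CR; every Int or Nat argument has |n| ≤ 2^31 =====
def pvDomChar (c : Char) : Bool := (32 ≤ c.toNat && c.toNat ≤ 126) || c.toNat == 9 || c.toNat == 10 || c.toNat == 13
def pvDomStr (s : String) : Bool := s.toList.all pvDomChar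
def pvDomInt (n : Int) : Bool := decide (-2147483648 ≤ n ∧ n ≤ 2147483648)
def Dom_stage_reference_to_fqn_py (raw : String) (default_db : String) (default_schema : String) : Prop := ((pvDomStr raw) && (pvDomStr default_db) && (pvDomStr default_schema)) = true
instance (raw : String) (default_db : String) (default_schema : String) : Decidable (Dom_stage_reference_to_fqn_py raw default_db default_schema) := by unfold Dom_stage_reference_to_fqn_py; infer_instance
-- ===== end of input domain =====

-- B replaces A's slice/split/split/comprehension pipeline by a single character scan that
-- cuts at '/', splits at '.' and strips quotes as it goes, and replaces the if/elif ladder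
-- by a while loop padding the missing leading components with the defaults (objective: alternative).

-- ===== PORT A =====
def stage_reference_to_fqn_py (raw : String) (default_db : String) (default_schema : String) : Option String :=
  if PySem.Str.startswith raw "@" = false then none
  else
    -- raw[1:].split("/", 1)[0]; sep ≠ "" so splitMax? is `some` and the list is nonempty,
    -- so the getD defaults are never reached
    let stripped :=
      (PySem.List.pyGet? ((PySem.Str.splitMax? (PySem.Str.slice raw (some 1) none) "/" 1).getD []) 0).getD ""
    if stripped = "" then none
    else
      let parts := ((((PySem.Str.split? stripped ".").getD [])).filter
          (fun part => decide (PySem.Str.stripChars part "\"" ≠ ""))).map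
          (fun part => PySem.Str.stripChars part "\"")
      -- parts[i] is always in range in the branches below, so getD's default is never reached
      if parts.length = 1 then
        some (PySem.Str.upper (PySem.Str.join "" [default_db, ".", default_schema, ".", (PySem.List.pyGet? parts 0).getD ""]))
      else if parts.length = 2 then
        some (PySem.Str.upper (PySem.Str.join "" [default_db, ".", (PySem.List.pyGet? parts 0).getD "", ".", (PySem.List.pyGet? parts 1).getD ""]))
      else if parts.length = 3 then
        some (PySem.Str.upper (PySem.Str.join "" [(PySem.List.pyGet? parts 0).getD "", ".", (PySem.List.pyGet? parts 1).getD "", ".", (PySem.List.pyGet? parts 2).getD ""]))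
      else none

-- ===== PORT B =====
-- the for-loop of Source B: break at '/', close a segment at '.', otherwise extend `cur`;
-- the post-loop flush of `cur` is the base case (and the break case)
def pvFlush (parts : List (List Char)) (cur : List Char) : List (List Char) :=
  let seg := PySem.Chars.stripChars cur ['"']
  if seg = [] then parts else parts ++ [seg]

def pvScan : List Char → List (List Char) → List Char → List (List Char)
  | [], parts, cur => pvFlush parts cur
  | c :: rest, parts, cur =>
      if c = '/' then pvFlush parts cur
      else if c = '.' then pvScan rest (pvFlush parts cur) []
      else pvScan rest parts (cur ++ [c])

-- the while loop of Source B: prepend a default until there are 3 components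
def pvPad (default_db default_schema : List Char) (parts : List (List Char)) : List (List Char) :=
  if parts.length < 3 then
    pvPad default_db default_schema
      ((if parts.length = 2 then default_db else default_schema) :: parts)
  else parts
termination_by 3 - parts.length

def stage_reference_to_fqn_py_alt (raw : String) (default_db : String) (default_schema : String) : Option String :=
  if PySem.Str.startswith raw "@" = false then none
  else
    let body := PySem.Str.slice raw (some 1) none
    if PySem.Str.slice body none (some 1) = "" ∨ PySem.Str.slice body none (some 1) = "/" then none
    else
      let parts := pvScan body.toList [] []
      if 1 ≤ parts.length ∧ parts.length ≤ 3 then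
        some (String.ofList (PySem.Chars.upper (PySem.Chars.join ['.']
          (pvPad default_db.toList default_schema.toList parts))))
      else none

-- ===== PRECONDITION & SPEC =====
def Spec_stage_reference_to_fqn_py (raw : String) (default_db : String) (default_schema : String) (out : Option String) : Prop := out = stage_reference_to_fqn_py_alt raw default_db default_schema
instance (raw : String) (default_db : String) (default_schema : String) (out : Option String) : Decidable (Spec_stage_reference_to_fqn_py raw default_db default_schema out) := by unfold Spec_stage_reference_to_fqn_py; infer_instance

-- ===== CLAIM (what is proved, stated in full; the proofs are below) =====
def Claim_equal_stage_reference_to_fqn_py : Prop := ∀ (raw : String) (default_db : String) (default_schema : String), Dom_stage_reference_to_fqn_py raw default_db default_schema → Spec_stage_reference_to_fqn_py raw default_db default_schema (stage_reference_to_fqn_py raw default_db default_schema)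

-- ===== LEMMAS AND PROOFS =====

-- literal-string facts used throughout
lemma pv_dot : ("." : String).toList = ['.'] := rfl
lemma pv_slash : ("/" : String).toList = ['/'] := rfl
lemma pv_quote : ("\"" : String).toList = ['"'] := rfl
lemma pv_empty : ("" : String).toList = [] := rfl

lemma pv_ofList_eq_empty (x : List Char) : (String.ofList x = "") ↔ x = [] := by
  rw [← String.toList_inj]; simp

-- structural-recursion model of PySem's fuel-based split-on-'.' loop, used only in the proof
def pvSp (pre : List Char) : List Char → List (List Char)
  | [] => [pre]
  | c :: rest => if c = '.' then pre :: pvSp [] rest else pvSp (pre ++ [c]) rest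

def pvClean (xs : List (List Char)) : List (List Char) :=
  (xs.map (fun s => PySem.Chars.stripChars s ['"'])).filter (fun s => s ≠ [])

-- splitOn.go with sep = "." computes pvSp
lemma pv_go_eq (fuel : Nat) : ∀ (l cur : List Char) (acc : List (List Char)), l.length < fuel →
    PySem.Chars.splitOn.go ['.'] fuel l cur acc = acc.reverse ++ pvSp cur.reverse l := by
  induction fuel with
  | zero => intro l cur acc h; omega
  | succ fuel ih =>
    intro l cur acc h
    cases l with
    | nil => simp [PySem.Chars.splitOn.go, pvSp]
    | cons c rest =>
      by_cases hc : c = '.'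
      · subst hc
        rw [show PySem.Chars.splitOn.go ['.'] (fuel + 1) ('.' :: rest) cur acc =
              PySem.Chars.splitOn.go ['.'] fuel rest [] (cur.reverse :: acc) from by
            simp [PySem.Chars.splitOn.go, List.isPrefixOf]]
        rw [ih rest [] _ (by simp at h; omega)]
        simp [pvSp]
      · rw [show PySem.Chars.splitOn.go ['.'] (fuel + 1) (c :: rest) cur acc =
              PySem.Chars.splitOn.go ['.'] fuel rest (c :: cur) acc from by
            simp [PySem.Chars.splitOn.go, List.isPrefixOf]
            intro h; exact absurd h.symm hc]
        rw [ih rest (c :: cur) acc (by simp at h; omega)]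
        simp [pvSp, hc]

-- splitOnMax.go once maxsplit is used up: the tail piece is appended whole
lemma pv_gomax0 (fuel : Nat) (l x : List Char) :
    ∃ r, PySem.Chars.splitOnMax.go ['/'] fuel 0 l [] [x] = x :: r := by
  cases fuel with
  | zero => exact ⟨[l], by simp [PySem.Chars.splitOnMax.go]⟩
  | succ fuel =>
    cases l with
    | nil => exact ⟨[[]], by simp [PySem.Chars.splitOnMax.go]⟩
    | cons c rest => exact ⟨[c :: rest], by simp [PySem.Chars.splitOnMax.go]⟩

-- splitOnMax.go with sep = "/" and maxsplit 1: the FIRST piece is the prefix before '/'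
lemma pv_gomax_head (fuel : Nat) : ∀ (l cur : List Char), l.length < fuel →
    ∃ rest, PySem.Chars.splitOnMax.go ['/'] fuel 1 l cur [] =
      (cur.reverse ++ l.takeWhile (· ≠ '/')) :: rest := by
  induction fuel with
  | zero => intro l cur h; omega
  | succ fuel ih =>
    intro l cur h
    cases l with
    | nil => exact ⟨[], by simp [PySem.Chars.splitOnMax.go]⟩
    | cons c rest =>
      by_cases hc : c = '/'
      · subst hc
        obtain ⟨r, hr⟩ := pv_gomax0 fuel rest cur.reverse
        refine ⟨r, ?_⟩
        rw [show PySem.Chars.splitOnMax.go ['/'] (fuel + 1) 1 ('/' :: rest) cur [] =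
              PySem.Chars.splitOnMax.go ['/'] fuel 0 rest [] [cur.reverse] from by
            simp [PySem.Chars.splitOnMax.go, List.isPrefixOf]]
        rw [hr]; simp
      · obtain ⟨r, hr⟩ := ih rest (c :: cur) (by simp at h; omega)
        refine ⟨r, ?_⟩
        rw [show PySem.Chars.splitOnMax.go ['/'] (fuel + 1) 1 (c :: rest) cur [] =
              PySem.Chars.splitOnMax.go ['/'] fuel 1 rest (c :: cur) [] from by
            simp [PySem.Chars.splitOnMax.go, List.isPrefixOf]
            intro h; exact absurd h.symm hc]
        rw [hr]; simp [hc]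

-- one-step equations for the scan
lemma pvScan_slash (rest : List Char) (p : List (List Char)) (q : List Char) :
    pvScan ('/' :: rest) p q = pvFlush p q := by simp [pvScan]

lemma pvScan_dot (rest : List Char) (p : List (List Char)) (q : List Char) :
    pvScan ('.' :: rest) p q = pvScan rest (pvFlush p q) [] := by simp [pvScan]

lemma pvScan_other (c : Char) (rest : List Char) (p : List (List Char)) (q : List Char)
    (hc : c ≠ '/') (hd : c ≠ '.') : pvScan (c :: rest) p q = pvScan rest p (q ++ [c]) := by
  simp [pvScan, hc, hd]

-- the scan stops at the first '/'
lemma pv_scan_takeWhile (l : List Char) : ∀ (parts : List (List Char)) (cur : List Char),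
    pvScan l parts cur = pvScan (l.takeWhile (· ≠ '/')) parts cur := by
  induction l with
  | nil => intro parts cur; rfl
  | cons c rest ih =>
    intro parts cur
    rw [List.takeWhile_cons]
    by_cases hc : c = '/'
    · subst hc; rw [if_neg (by simp), pvScan_slash]; rfl
    · rw [if_pos (by simp [hc])]
      by_cases hd : c = '.'
      · subst hd; rw [pvScan_dot, pvScan_dot]; exact ih _ _
      · rw [pvScan_other c rest parts cur hc hd, pvScan_other c _ parts cur hc hd]
        exact ih _ _

-- on '/'-free input the scan computes the cleaned split
lemma pv_scan_eq (l : List Char) : ∀ (parts : List (List Char)) (cur : List Char), '/' ∉ l →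
    pvScan l parts cur = parts ++ pvClean (pvSp cur l) := by
  induction l with
  | nil =>
    intro parts cur _
    by_cases hs : PySem.Chars.stripChars cur ['"'] = [] <;>
      simp [pvScan, pvFlush, pvClean, pvSp, hs]
  | cons c rest ih =>
    intro parts cur h
    simp only [List.mem_cons, not_or] at h
    have hc : c ≠ '/' := fun e => h.1 e.symm
    by_cases hd : c = '.'
    · subst hd
      rw [pvScan_dot, ih _ _ h.2]
      by_cases hs : PySem.Chars.stripChars cur ['"'] = [] <;>
        simp [pvFlush, pvClean, pvSp, hs]
    · rw [pvScan_other c rest parts cur hc hd, ih _ _ h.2]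
      simp [pvSp, hd]

-- the while loop of Source B on lists of each admissible length
lemma pvPad3 (db ds : List Char) (p : List (List Char)) (h : p.length = 3) :
    pvPad db ds p = p := by
  rw [pvPad]; simp [h]

lemma pvPad2 (db ds : List Char) (p : List (List Char)) (h : p.length = 2) :
    pvPad db ds p = db :: p := by
  rw [pvPad]; simp [h]
  exact pvPad3 db ds _ (by simp [h])

lemma pvPad1 (db ds : List Char) (p : List (List Char)) (h : p.length = 1) :
    pvPad db ds p = db :: ds :: p := by
  rw [pvPad]; simp [h]
  exact pvPad2 db ds _ (by simp [h])

-- A's filter-then-map over ofList-wrapped pieces is pvClean, ofList-wrapped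
lemma pv_parts_map (L : List (List Char)) :
    ((L.map String.ofList).filter
        (fun part => decide (PySem.Str.stripChars part "\"" ≠ ""))).map
      (fun part => PySem.Str.stripChars part "\"") = (pvClean L).map String.ofList := by
  induction L with
  | nil => rfl
  | cons x xs ih =>
    have hpred : PySem.Str.stripChars (String.ofList x) "\"" =
        String.ofList (PySem.Chars.stripChars x ['"']) := by
      simp [PySem.Str.stripChars, pv_quote]
    by_cases hx : PySem.Chars.stripChars x ['"'] = []
    · rw [List.map_cons, List.filter_cons,
        if_neg (by simp [hpred, hx])]
      rw [show pvClean (x :: xs) = pvClean xs from by simp [pvClean, hx]]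
      exact ih
    · rw [List.map_cons, List.filter_cons,
        if_pos (by simp [hpred, hx])]
      rw [List.map_cons, hpred,
        show pvClean (x :: xs) = PySem.Chars.stripChars x ['"'] :: pvClean xs from by
          simp [pvClean, hx]]
      rw [List.map_cons]
      exact congrArg _ ih

-- Source B's leading guard `body[:1] in ("", "/")` says exactly that nothing precedes the first '/'
lemma pv_guard_iff (s : String) :
    (PySem.Str.slice s none (some 1) = "" ∨ PySem.Str.slice s none (some 1) = "/") ↔
      s.toList.takeWhile (· ≠ '/') = [] := by
  have ht : (PySem.Str.slice s none (some 1)).toList = s.toList.take 1 := by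
    simp [PySem.Str.toList_slice, PySem.List.slice_to]
  rw [show (PySem.Str.slice s none (some 1) = "") ↔ s.toList.take 1 = [] from by
        rw [← String.toList_inj, ht, pv_empty]]
  rw [show (PySem.Str.slice s none (some 1) = "/") ↔ s.toList.take 1 = ['/'] from by
        rw [← String.toList_inj, ht, pv_slash]]
  cases s.toList with
  | nil => simp
  | cons c t => by_cases hc : c = '/' <;> simp [hc]

-- A's stripped piece, computed through splitMax?, is the prefix before the first '/'
lemma pv_stripped (s : String) :
    (PySem.List.pyGet? ((PySem.Str.splitMax? s "/" 1).getD []) 0).getD "" =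
      String.ofList (s.toList.takeWhile (· ≠ '/')) := by
  simp [PySem.Str.splitMax?, pv_slash, PySem.Chars.splitMax?, PySem.Chars.splitOnMax,
    PySem.List.pyGet?, PySem.List.pyIdx?]
  obtain ⟨r, hr⟩ := pv_gomax_head (s.length + 1) s.toList [] (by simp)
  simp only [List.reverse_nil, List.nil_append] at hr
  rw [hr]
  simp

-- A's split on '.' is pvSp
lemma pv_split (x : List Char) :
    (PySem.Str.split? (String.ofList x) ".").getD [] = (pvSp [] x).map String.ofList := by
  have h := pv_go_eq (x.length + 1) x [] [] (by omega)
  simp only [List.reverse_nil, List.nil_append] at h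
  simp [PySem.Str.split?, pv_dot, PySem.Chars.split?, PySem.Chars.splitOn, h]

-- the if/elif ladder over A's parts equals B's guard + pad + join, piece for piece
lemma pv_final (db ds : String) (b : List (List Char)) :
    (if (b.map String.ofList).length = 1 then
        some (PySem.Str.upper (PySem.Str.join "" [db, ".", ds, ".",
          (PySem.List.pyGet? (b.map String.ofList) 0).getD ""]))
      else if (b.map String.ofList).length = 2 then
        some (PySem.Str.upper (PySem.Str.join "" [db, ".",
          (PySem.List.pyGet? (b.map String.ofList) 0).getD "", ".",
          (PySem.List.pyGet? (b.map String.ofList) 1).getD ""]))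
      else if (b.map String.ofList).length = 3 then
        some (PySem.Str.upper (PySem.Str.join "" [
          (PySem.List.pyGet? (b.map String.ofList) 0).getD "", ".",
          (PySem.List.pyGet? (b.map String.ofList) 1).getD "", ".",
          (PySem.List.pyGet? (b.map String.ofList) 2).getD ""]))
      else none) =
    (if 1 ≤ b.length ∧ b.length ≤ 3 then
        some (String.ofList (PySem.Chars.upper (PySem.Chars.join ['.']
          (pvPad db.toList ds.toList b))))
      else none) := by
  match b with
  | [] => norm_num
  | [a] =>
    rw [pvPad1 _ _ _ rfl]
    simp [PySem.List.pyGet?, PySem.List.pyIdx?, PySem.Str.upper, PySem.Str.join,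
      PySem.Chars.join, PySem.Chars.upper, List.intercalate, List.intersperse, pv_dot]
  | [a, a2] =>
    rw [pvPad2 _ _ _ rfl]
    simp [PySem.List.pyGet?, PySem.List.pyIdx?, PySem.Str.upper, PySem.Str.join,
      PySem.Chars.join, PySem.Chars.upper, List.intercalate, List.intersperse, pv_dot]
  | [a, a2, a3] =>
    rw [pvPad3 _ _ _ rfl]
    simp [PySem.List.pyGet?, PySem.List.pyIdx?, PySem.Str.upper, PySem.Str.join,
      PySem.Chars.join, PySem.Chars.upper, List.intercalate, List.intersperse, pv_dot]
  | a :: a2 :: a3 :: a4 :: t =>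
    simp only [List.length_map, List.length_cons]
    rw [if_neg (by omega), if_neg (by omega), if_neg (by omega), if_neg (by omega)]

-- ===== VERDICT (by name: the statement is the Claim_ definition above) =====
theorem stage_reference_to_fqn_py_spec : Claim_equal_stage_reference_to_fqn_py := by
  intro raw db ds _
  unfold Spec_stage_reference_to_fqn_py stage_reference_to_fqn_py stage_reference_to_fqn_py_alt
  by_cases h1 : PySem.Str.startswith raw "@" = false
  · rw [if_pos h1, if_pos h1]
  · rw [if_neg h1, if_neg h1]
    rw [pv_stripped]
    by_cases h2 : (PySem.Str.slice raw (some 1) none).toList.takeWhile (· ≠ '/') = []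
    · rw [if_pos (by rw [h2]), if_pos ((pv_guard_iff _).mpr h2)]
    · rw [if_neg (fun e => h2 ((pv_ofList_eq_empty _).mp e)),
        if_neg (fun e => h2 ((pv_guard_iff _).mp e))]
      rw [pv_split, pv_parts_map]
      rw [pv_scan_takeWhile, pv_scan_eq _ _ _
        (fun hm => by simpa using List.mem_takeWhile_imp hm)]
      rw [List.nil_append]
      exact pv_final db ds _
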